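-- pv_equiv track=rewrite | github.com/vvarnas/Advent-of-Code-2024 | advent3.py | remove_intervals_between_do_and_dont
-- ===== SOURCE A (Python) =====
-- def remove_intervals_between_do_and_dont(arr):
--     result = []
--     skip = False
--     for item in arr:
--         if item[0] == "don't":
--             skip = True
--         if not skip:
--             result.append(item)
--         if item[0] == "do" and skip:
--             skip = False
--     return result
-- ===== SOURCE B (Python) =====
-- def remove_intervals_between_do_and_dont(arr):
--     result = []
--     i, n = 0, len(arr)
--     while i < n:
--         if arr[i][0] == "don't":
--             i += 1
--             while i < n and arr[i][0] != "do":
--                 i += 1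
--             i += 1  # consume the closing "do" (if any)
--         else:
--             result.append(arr[i])
--             i += 1
--     return result
-- ===== Notes on version B (the rewrite author's own statement) =====
-- stated objective: alternative
-- what changed: Replaced the boolean skip flag carried across one outer loop with an index-based outer loop that, on seeing "don't", runs an inner loop jumping past the whole skipped interval up to and including the closing "do".
import Mathlib
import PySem

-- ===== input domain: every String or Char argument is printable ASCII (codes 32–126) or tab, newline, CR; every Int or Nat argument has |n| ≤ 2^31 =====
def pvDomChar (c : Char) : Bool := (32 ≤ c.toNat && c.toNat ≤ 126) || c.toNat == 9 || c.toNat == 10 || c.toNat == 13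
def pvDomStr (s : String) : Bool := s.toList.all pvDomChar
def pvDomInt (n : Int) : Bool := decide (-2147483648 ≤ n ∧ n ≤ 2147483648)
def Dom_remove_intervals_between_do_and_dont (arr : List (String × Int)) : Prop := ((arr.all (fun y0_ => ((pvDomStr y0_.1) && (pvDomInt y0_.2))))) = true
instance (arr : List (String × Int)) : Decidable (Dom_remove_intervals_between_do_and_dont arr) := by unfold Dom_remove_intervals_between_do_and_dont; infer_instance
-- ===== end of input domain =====

-- B replaces A's skip flag carried across the loop by an index-style scan that, on "don't",
-- jumps past the skipped interval (up to and including the closing "do") with an inner scan.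

-- ===== PORT A =====
-- A's for-loop over (result, skip) state, transliterated statement by statement.
def pvStepA (st : List (String × Int) × Bool) (item : String × Int) : List (String × Int) × Bool :=
  let skip := if item.1 == "don't" then true else st.2
  let result := if !skip then st.1 ++ [item] else st.1
  let skip := if item.1 == "do" && skip then false else skip
  (result, skip)

def remove_intervals_between_do_and_dont (arr : List (String × Int)) : List (String × Int) :=
  (arr.foldl pvStepA ([], false)).1

-- ===== PORT B =====
-- inner `while i < n and arr[i][0] != "do"` loop plus the `i += 1` consuming the closing "do":
-- returns the suffix after the closing "do" (empty if no "do" remains).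
def pvSkipToDo : List (String × Int) → List (String × Int)
  | [] => []
  | x :: xs => if x.1 == "do" then xs else pvSkipToDo xs

theorem pvSkipToDo_len (l : List (String × Int)) : (pvSkipToDo l).length ≤ l.length := by
  induction l with
  | nil => simp [pvSkipToDo]
  | cons x xs ih => simp [pvSkipToDo]; split <;> omega

-- outer `while i < n` loop as recursion on the remaining suffix of arr.
def remove_intervals_between_do_and_dont_alt (arr : List (String × Int)) : List (String × Int) :=
  match arr with
  | [] => []
  | x :: xs =>
    if x.1 == "don't" then remove_intervals_between_do_and_dont_alt (pvSkipToDo xs)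
    else x :: remove_intervals_between_do_and_dont_alt xs
termination_by arr.length
decreasing_by
  · exact Nat.lt_succ_of_le (pvSkipToDo_len xs)
  · simp

-- ===== PRECONDITION & SPEC =====
def Spec_remove_intervals_between_do_and_dont (arr : List (String × Int)) (out : List (String × Int)) : Prop := out = remove_intervals_between_do_and_dont_alt arr
instance (arr : List (String × Int)) (out : List (String × Int)) : Decidable (Spec_remove_intervals_between_do_and_dont arr out) := by unfold Spec_remove_intervals_between_do_and_dont; infer_instance

-- ===== CLAIM (what is proved, stated in full; the proofs are below) =====
def Claim_equal_remove_intervals_between_do_and_dont : Prop := ∀ (arr : List (String × Int)), Dom_remove_intervals_between_do_and_dont arr → Spec_remove_intervals_between_do_and_dont arr (remove_intervals_between_do_and_dont arr)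

-- ===== LEMMAS AND PROOFS =====

-- In the skipping state, A's fold consumes exactly the prefix pvSkipToDo drops and resumes non-skipping.
theorem goA_skip (l : List (String × Int)) (res : List (String × Int)) :
    (l.foldl pvStepA (res, true)).1 = ((pvSkipToDo l).foldl pvStepA (res, false)).1 := by
  induction l generalizing res with
  | nil => simp [pvSkipToDo]
  | cons x xs ih =>
    by_cases h : x.1 = "do"
    · simp [pvSkipToDo, pvStepA, h]
    · by_cases h' : x.1 = "don't" <;> simp [pvSkipToDo, pvStepA, h, h', ih]

-- In the non-skipping state, A's fold appends exactly B's output.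
theorem goA_run (n : ℕ) (l : List (String × Int)) (res : List (String × Int)) (hn : l.length ≤ n) :
    (l.foldl pvStepA (res, false)).1 = res ++ remove_intervals_between_do_and_dont_alt l := by
  induction n generalizing l res with
  | zero =>
    have : l = [] := List.eq_nil_of_length_eq_zero (Nat.le_zero.mp hn)
    simp [this, remove_intervals_between_do_and_dont_alt]
  | succ n ih =>
    match l with
    | [] => simp [remove_intervals_between_do_and_dont_alt]
    | x :: xs =>
      simp only [List.length_cons, Nat.succ_le_succ_iff] at hn
      by_cases h : x.1 = "don't"
      · rw [remove_intervals_between_do_and_dont_alt]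
        simp only [List.foldl_cons, pvStepA, beq_iff_eq, h]
        simp only [show (("don't" : String) == "do") = false from by decide,
          Bool.false_and, Bool.false_eq_true, if_false]
        simp only [if_true, Bool.not_true, Bool.false_eq_true, if_false]
        rw [goA_skip]
        exact ih (pvSkipToDo xs) res (le_trans (pvSkipToDo_len xs) hn)
      · rw [remove_intervals_between_do_and_dont_alt]
        simp only [List.foldl_cons, pvStepA, beq_iff_eq, h]
        have := ih xs (res ++ [x]) hn
        by_cases h2 : x.1 = "do" <;> simp [h2, this]

-- ===== VERDICT (by name: the statement is the Claim_ definition above) =====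
theorem remove_intervals_between_do_and_dont_spec : Claim_equal_remove_intervals_between_do_and_dont := by
  intro arr _
  show _ = _
  unfold remove_intervals_between_do_and_dont
  simpa using goA_run arr.length arr [] le_rfl
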